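-- pv_equiv track=rewrite | github.com/VIJAY-mark/project | password strength/passwordchecker.py | generate_leet_variants
-- ===== SOURCE A (Python) =====
-- import itertools
-- from typing import List, Set
--
-- LEET_MAP = {
--     'a': ['a', '@', '4'],
--     'b': ['b', '8'],
--     'e': ['e', '3'],
--     'i': ['i', '1', '!'],
--     'l': ['l', '1'],
--     'o': ['o', '0'],
--     's': ['s', '$', '5'],
--     't': ['t', '7'],
--     'g': ['g', '9'],
--     # letters not listed will just map to themselves
-- }
--
-- MAX_LEET_COMBINATIONS = 5000  # don't generate more than this many leet variants per base word
--
-- def generate_leet_variants(word: str, cap: int = MAX_LEET_COMBINATIONS) -> Set[str]: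
--     """
--     Generate leet variants for a word but cap the number returned.
--     We build combos from the LEET_MAP but stop early if the product explodes.
--     """
--     if not word:
--         return set()
--
--     # Build list of possible characters for each position
--     choices = []
--     for ch in word:
--         lower = ch.lower()
--         if lower in LEET_MAP:
--             # keep both same-case and leet options
--             options = list(dict.fromkeys([ch] + LEET_MAP[lower]))  # preserve order, dedupe
--         else:
--             options = [ch]
--         choices.append(options)
--
--     # compute estimated size and bail if too large
--     estimated = 1
--     for c in choices:
--         estimated *= len(c)
--         if estimated > cap * 5:  # soft check before iterating
--             break
--
--     variants = set()
--     # Use product but stop when cap reached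
--     for combo in itertools.product(*choices):
--         variants.add(''.join(combo))
--         if len(variants) >= cap:
--             break
--     return variants
-- ===== SOURCE B (Python) =====
-- LEET_MAP = {
--     'a': ['a', '@', '4'],
--     'b': ['b', '8'],
--     'e': ['e', '3'],
--     'i': ['i', '1', '!'],
--     'l': ['l', '1'],
--     'o': ['o', '0'],
--     's': ['s', '$', '5'],
--     't': ['t', '7'],
--     'g': ['g', '9'],
-- }
--
-- MAX_LEET_COMBINATIONS = 5000
--
-- def generate_leet_variants(word, cap=MAX_LEET_COMBINATIONS):
--     if not word:
--         return set()
--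
--     choices = []
--     for ch in word:
--         lower = ch.lower()
--         if lower in LEET_MAP:
--             options = list(dict.fromkeys([ch] + LEET_MAP[lower]))
--         else:
--             options = [ch]
--         choices.append(options)
--
--     total = 1
--     for c in choices:
--         total *= len(c)
--
--     # first-choice character of every position; positions whose digit is 0 keep it
--     base = [opts[0] for opts in choices]
--     # positions that actually vary, last (least significant) first
--     active = [(k, opts) for k, opts in enumerate(choices) if len(opts) > 1]
--     active.reverse()
--
--     variants = set()
--     for i in range(total):
--         # decode index i into a combo: mixed radix over the active positions,
--         # last position least significant; once j hits 0 all remaining digits are 0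
--         j = i
--         out = base.copy()
--         for k, opts in active:
--             if j == 0:
--                 break
--             out[k] = opts[j % len(opts)]
--             j //= len(opts)
--         variants.add(''.join(out))
--         if len(variants) >= cap:
--             break
--     return variants
-- ===== Notes on version B (the rewrite author's own statement) =====
-- stated objective: alternative
-- what changed: Replaces itertools.product with mixed-radix index decoding: total = product of the per-position option counts, and each variant is decoded from its integer index i by taking digits from the last position (digit = j % len, j //= len), stopping as soon as j = 0 and splicing a precomputed first-choice prefix for the undecoded positions; enumeration order is identical and the dead 'estimated' computation is dropped.
import Mathlib
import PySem

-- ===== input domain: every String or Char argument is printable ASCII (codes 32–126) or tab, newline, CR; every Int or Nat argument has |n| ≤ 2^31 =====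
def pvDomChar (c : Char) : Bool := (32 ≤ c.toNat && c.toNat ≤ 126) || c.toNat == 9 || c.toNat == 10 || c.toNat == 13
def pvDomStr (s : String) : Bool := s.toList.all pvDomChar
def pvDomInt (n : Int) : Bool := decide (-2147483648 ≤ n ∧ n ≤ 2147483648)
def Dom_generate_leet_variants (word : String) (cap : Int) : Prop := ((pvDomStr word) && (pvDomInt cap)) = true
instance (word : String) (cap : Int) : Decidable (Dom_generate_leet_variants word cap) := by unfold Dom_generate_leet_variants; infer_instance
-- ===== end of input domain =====

-- B replaces itertools.product by mixed-radix index decoding of each combo (same enumeration order,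
-- dead `estimated` computation dropped): an alternative decomposition, not claimed faster.

-- Module constant LEET_MAP, and the per-position `choices` construction, which is the SAME code in
-- both Pythons (shared helper; both ports call it).
def leetMap : PySem.Dict Char (List Char) :=
  PySem.Dict.ofList
    [('a', ['a', '@', '4']), ('b', ['b', '8']), ('e', ['e', '3']), ('i', ['i', '1', '!']),
     ('l', ['l', '1']), ('o', ['o', '0']), ('s', ['s', '$', '5']), ('t', ['t', '7']), ('g', ['g', '9'])]

-- choices = []; for ch in word: … choices.append(options)
def leetChoices (word : List Char) : List (List Char) :=
  word.foldl (fun choices ch =>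
    let lower := PySem.Chars.lowerChar ch
    match PySem.Dict.get? leetMap lower with            -- `lower in LEET_MAP` + lookup
    | some opts => choices ++ [PySem.List.dedup (ch :: opts)]  -- list(dict.fromkeys([ch] + LEET_MAP[lower]))
    | none => choices ++ [[ch]]) []

-- ===== PORT A =====
-- estimated = 1; for c in choices: estimated *= len(c); if estimated > cap*5: break   (dead: result unused)
def estLoop (cap : Int) : List (List Char) → Int → Int
  | [], e => e
  | c :: rest, e =>
      let e' := e * (c.length : Int)
      if e' > cap * 5 then e' else estLoop cap rest e'

-- for combo in itertools.product(*choices): variants.add(''.join(combo)); if len(variants) >= cap: break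
-- lazy product loop: `pre` holds the chars chosen so far (reversed); the Bool is the break flag.
def prodLoop (cap : Int) (choices : List (List Char)) (pre : List Char)
    (st : PySem.Set String × Bool) : PySem.Set String × Bool :=
  if st.2 then st else
  match choices with
  | [] =>
      let s' := PySem.Set.add st.1 (String.ofList pre.reverse)
      (s', decide (cap ≤ (s'.length : Int)))
  | opts :: rest => opts.foldl (fun acc c => prodLoop cap rest (c :: pre) acc) st
termination_by choices

def generate_leet_variants (word : String) (cap : Int) : List String :=
  if word.toList.isEmpty then PySem.Set.empty
  else
    let choices := leetChoices word.toList
    let _estimated := estLoop cap choices 1   -- computed and never used, exactly as in A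
    (prodLoop cap choices [] (PySem.Set.empty, false)).1

-- ===== PORT B =====
-- j = i; out = base.copy()
-- for k, opts in active: if j == 0: break; out[k] = opts[j % len(opts)]; j //= len(opts)
-- (opts[j % len(opts)] is in range since opts ≠ []; out[k] = … is List.set at k ≥ 0)
def decodeUpd : List (Int × List Char) → Nat → List Char → List Char
  | [], _, out => out
  | (k, opts) :: rest, j, out =>
      if j = 0 then out
      else decodeUpd rest (j / opts.length) (out.set k.toNat (opts.getD (j % opts.length) '?'))

-- for i in range(total): variants.add(''.join(out)); if len(variants) >= cap: break
def goB (cap : Int) (active : List (Int × List Char)) (base : List Char) (total : Nat) (i : Nat)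
    (s : PySem.Set String) : PySem.Set String :=
  if _h : i < total then
    let s' := PySem.Set.add s (String.ofList (decodeUpd active i base))
    if cap ≤ (s'.length : Int) then s' else goB cap active base total (i + 1) s'
  else s
termination_by total - i

def generate_leet_variants_alt (word : String) (cap : Int) : List String :=
  if word.toList.isEmpty then PySem.Set.empty
  else
    let choices := leetChoices word.toList
    let total := choices.foldl (fun t c => t * c.length) 1
    let base := choices.map (fun opts => opts.getD 0 '?')          -- base = [opts[0] for opts in choices]
    -- active = [(k, opts) for k, opts in enumerate(choices) if len(opts) > 1]; active.reverse()
    let active := ((PySem.List.enumerate choices).filter (fun p => decide (1 < p.2.length))).reverse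
    goB cap active base total 0 PySem.Set.empty

-- ===== PRECONDITION & SPEC =====
def Spec_generate_leet_variants (word : String) (cap : Int) (out : List String) : Prop := out = generate_leet_variants_alt word cap
instance (word : String) (cap : Int) (out : List String) : Decidable (Spec_generate_leet_variants word cap out) := by unfold Spec_generate_leet_variants; infer_instance

-- ===== CLAIM (what is proved, stated in full; the proofs are below) =====
def Claim_equal_generate_leet_variants : Prop := ∀ (word : String) (cap : Int), Dom_generate_leet_variants word cap → Spec_generate_leet_variants word cap (generate_leet_variants word cap)

-- ===== LEMMAS AND PROOFS =====

-- product of the per-position option counts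
def prodLen (cs : List (List Char)) : Nat := (cs.map List.length).prod

-- the full product list, in itertools.product order
def productList : List (List Char) → List (List Char)
  | [] => [[]]
  | opts :: rest => opts.flatMap (fun c => (productList rest).map (fun l => c :: l))

-- reference loop: fold the given variant strings into the set, honouring the break flag
def stopFold (cap : Int) : List String → PySem.Set String × Bool → PySem.Set String × Bool
  | [], st => st
  | x :: xs, st =>
      if st.2 then st
      else
        let s' := PySem.Set.add st.1 x
        stopFold cap xs (s', decide (cap ≤ (s'.length : Int)))

theorem stopFold_done (cap : Int) (l : List String) (st : PySem.Set String × Bool)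
    (h : st.2 = true) : stopFold cap l st = st := by
  cases l <;> simp [stopFold, h]

theorem stopFold_append (cap : Int) (l₁ l₂ : List String) (st : PySem.Set String × Bool) :
    stopFold cap (l₁ ++ l₂) st = stopFold cap l₂ (stopFold cap l₁ st) := by
  induction l₁ generalizing st with
  | nil => rfl
  | cons x xs ih =>
      by_cases h : st.2
      · simp [stopFold, h, stopFold_done cap l₂ st h]
      · simp only [List.cons_append, stopFold, h]
        simp [ih]

theorem stopFold_flatMap {α : Type} (cap : Int) (l : List α) (g : α → List String)
    (st : PySem.Set String × Bool) :
    stopFold cap (l.flatMap g) st = l.foldl (fun acc x => stopFold cap (g x) acc) st := by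
  induction l generalizing st with
  | nil => rfl
  | cons x xs ih => simp [List.flatMap_cons, stopFold_append, ih]

-- A's lazy product loop IS stopFold over the materialised product list
theorem prodLoop_eq (cap : Int) (cs : List (List Char)) :
    ∀ (pre : List Char) (st : PySem.Set String × Bool),
    prodLoop cap cs pre st
      = stopFold cap ((productList cs).map (fun l => String.ofList (pre.reverse ++ l))) st := by
  induction cs with
  | nil =>
      intro pre st
      simp [prodLoop, productList, stopFold]
  | cons opts rest ih =>
      intro pre st
      rw [prodLoop]
      have hmap : (productList (opts :: rest)).map (fun l => String.ofList (pre.reverse ++ l))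
          = opts.flatMap (fun c =>
              (productList rest).map (fun l => String.ofList ((c :: pre).reverse ++ l))) := by
        simp [productList, List.map_flatMap, Function.comp_def]
      by_cases h : st.2
      · rw [if_pos h, hmap, stopFold_done _ _ _ h]
      · rw [if_neg h, hmap, stopFold_flatMap]
        have hf : (fun (acc : PySem.Set String × Bool) c => prodLoop cap rest (c :: pre) acc)
            = fun acc c => stopFold cap
                ((productList rest).map (fun l => String.ofList ((c :: pre).reverse ++ l))) acc :=
          funext fun acc => funext fun c => ih (c :: pre) acc
        rw [hf]

-- forward form of the decoder: head digit is the most significant one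
def decodeF : List (List Char) → Nat → List Char
  | [], _ => []
  | opts :: rest, i =>
      opts.getD (i / prodLen rest % opts.length) '?' :: decodeF rest (i % prodLen rest)

theorem decodeF_mod (cs : List (List Char)) :
    ∀ j : Nat, decodeF cs (j % prodLen cs) = decodeF cs j := by
  induction cs with
  | nil => intro j; rfl
  | cons opts rest ih =>
      intro j
      have h1 : j % prodLen (opts :: rest) / prodLen rest = j / prodLen rest % opts.length := by
        simpa [prodLen, Nat.mul_comm] using Nat.mod_mul_right_div_self j (prodLen rest) opts.length
      have h2 : j % prodLen (opts :: rest) % prodLen rest = j % prodLen rest := by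
        exact Nat.mod_mod_of_dvd j ⟨opts.length, by simp [prodLen, Nat.mul_comm]⟩
      simp [decodeF, h1, h2, ih]

theorem productList_eq_nil (cs : List (List Char)) (h : prodLen cs = 0) : productList cs = [] := by
  induction cs with
  | nil => simp [prodLen] at h
  | cons opts rest ih =>
      simp only [prodLen, List.map_cons, List.prod_cons, Nat.mul_eq_zero] at h
      rcases h with h | h
      · have : opts = [] := List.length_eq_zero_iff.mp h
        simp [productList, this]
      · simp [productList, ih h]

theorem map_range_mul {α : Type} (a b : Nat) (f : Nat → α) :
    (List.range (a * b)).map f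
      = (List.range a).flatMap (fun j => (List.range b).map (fun k => f (j * b + k))) := by
  induction a with
  | zero => simp
  | succ a ih =>
      have : (a + 1) * b = a * b + b := by ring
      rw [this, List.range_add, List.map_append, ih, List.range_succ, List.flatMap_append]
      simp [Function.comp_def]

theorem flatMap_range_getD {α β : Type} (d : α) (l : List α) (g : α → List β) :
    (List.range l.length).flatMap (fun j => g (l.getD j d)) = l.flatMap g := by
  induction l with
  | nil => simp
  | cons x xs ih =>
      rw [List.length_cons, List.range_succ_eq_map, List.flatMap_cons, List.flatMap_map]
      simp only [List.getD_cons_zero, List.getD_cons_succ]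
      rw [ih, List.flatMap_cons]

-- the central fact: decoding the indices 0 … total-1 yields exactly itertools.product's list
theorem map_decodeF_range (cs : List (List Char)) :
    (List.range (prodLen cs)).map (decodeF cs) = productList cs := by
  induction cs with
  | nil => simp [prodLen, productList, decodeF]
  | cons opts rest ih =>
      by_cases hb : prodLen rest = 0
      · have h0 : prodLen (opts :: rest) = 0 := by simp [prodLen] at hb ⊢; right; exact hb
        rw [h0, productList_eq_nil _ h0]
        simp
      · have hb' : 0 < prodLen rest := Nat.pos_of_ne_zero hb
        have hP : prodLen (opts :: rest) = opts.length * prodLen rest := by simp [prodLen]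
        rw [hP, map_range_mul]
        have hinner : ∀ j, j < opts.length →
            (List.range (prodLen rest)).map (fun k => decodeF (opts :: rest) (j * prodLen rest + k))
              = (productList rest).map (fun l => opts.getD j '?' :: l) := by
          intro j hj
          have : ∀ k ∈ List.range (prodLen rest),
              decodeF (opts :: rest) (j * prodLen rest + k) = opts.getD j '?' :: decodeF rest k := by
            intro k hk
            have hk' : k < prodLen rest := List.mem_range.mp hk
            have hdiv : (j * prodLen rest + k) / prodLen rest = j := by
              rw [Nat.mul_comm j (prodLen rest), Nat.mul_add_div hb']
              simp [Nat.div_eq_of_lt hk']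
            have hmod : (j * prodLen rest + k) % prodLen rest = k := by
              rw [Nat.mul_comm, Nat.mul_add_mod]
              exact Nat.mod_eq_of_lt hk'
            simp [decodeF, hdiv, hmod, Nat.mod_eq_of_lt hj]
          rw [List.map_congr_left this, ← ih, List.map_map]
          rfl
        have : (List.range opts.length).flatMap
            (fun j => (List.range (prodLen rest)).map
              (fun k => decodeF (opts :: rest) (j * prodLen rest + k)))
            = (List.range opts.length).flatMap
              (fun j => (productList rest).map (fun l => opts.getD j '?' :: l)) := by
          apply List.flatMap_congr
          intro j hj
          exact hinner j (List.mem_range.mp hj)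
        rw [this]
        have := flatMap_range_getD '?' opts
          (fun c => (productList rest).map (fun l => c :: l))
        simpa [productList] using this

-- write ALL positions' digits (last-first), no skipping and no break
def setAll : List (Int × List Char) → Nat → List Char → List Char
  | [], _, out => out
  | (k, opts) :: rest, j, out =>
      setAll rest (j / opts.length) (out.set k.toNat (opts.getD (j % opts.length) '?'))

def prodLenP (l : List (Int × List Char)) : Nat := (l.map (fun p => p.2.length)).prod

theorem setAll_append (l₁ l₂ : List (Int × List Char)) :
    ∀ (j : Nat) (out : List Char),
    setAll (l₁ ++ l₂) j out = setAll l₂ (j / prodLenP l₁) (setAll l₁ j out) := by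
  induction l₁ with
  | nil => intro j out; simp [setAll, prodLenP]
  | cons p r ih =>
      intro j out
      obtain ⟨k, opts⟩ := p
      have hd : j / opts.length / prodLenP r = j / prodLenP ((k, opts) :: r) := by
        simpa [prodLenP] using Nat.div_div_eq_div_mul j opts.length (prodLenP r)
      simp [setAll, ih, hd]

theorem take_succ_set (out : List Char) (st : Nat) (c : Char) (h : st < out.length) :
    (out.take (st + 1)).set st c = out.take st ++ [c] := by
  rw [List.take_add_one, List.getElem?_eq_getElem h]
  rw [List.set_append_right _ _ (by simp [Nat.le_of_lt h])]
  simp [Nat.min_eq_left (Nat.le_of_lt h)]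

theorem prodLenP_enum_rev (cs : List (List Char)) (st : Int) :
    prodLenP ((PySem.List.enumerate cs st).reverse) = prodLen cs := by
  unfold prodLenP prodLen
  rw [List.map_reverse, List.prod_reverse,
      show (fun p : Int × List Char => p.2.length) = (List.length ∘ fun p : Int × List Char => p.2)
        from rfl,
      ← List.map_map, PySem.List.map_snd_enumerate]

-- the sequential writes of all digits paint exactly decodeF over the enumerated segment
theorem setAll_enum_rev (cs : List (List Char)) :
    ∀ (st : Nat) (j : Nat) (out : List Char), st + cs.length ≤ out.length →
    setAll ((PySem.List.enumerate cs (st : Int)).reverse) j out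
      = out.take st ++ decodeF cs j ++ out.drop (st + cs.length) := by
  induction cs with
  | nil => intro st j out h; simp [PySem.List.enumerate_nil, setAll, decodeF]
  | cons opts rest ih =>
      intro st j out h
      rw [PySem.List.enumerate_cons, List.reverse_cons, setAll_append, prodLenP_enum_rev]
      have hst : ((st : Int) + 1) = ((st + 1 : Nat) : Int) := by push_cast; ring
      rw [hst, ih (st + 1) j out (by simp at h ⊢; omega)]
      have hlt : st < out.length := by simp at h; omega
      simp only [setAll, Int.toNat_natCast]
      have hlen : (out.take (st + 1)).length = st + 1 := by
        simp; omega
      rw [List.set_append_left _ _ (by rw [List.length_append, hlen]; omega)]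
      rw [List.set_append_left _ _ (by rw [hlen]; omega)]
      rw [take_succ_set out st _ hlt]
      have hdf : decodeF (opts :: rest) j
          = opts.getD (j / prodLen rest % opts.length) '?' :: decodeF rest (j % prodLen rest) := rfl
      rw [hdf, decodeF_mod]
      simp [Nat.add_assoc, Nat.add_comm rest.length 1]

theorem decodeUpd_zero (l : List (Int × List Char)) (out : List Char) :
    decodeUpd l 0 out = out := by
  cases l with
  | nil => rfl
  | cons p r => obtain ⟨k, opts⟩ := p; simp [decodeUpd]

theorem setAll_zero (rl : List (Int × List Char)) :
    ∀ out : List Char,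
    (∀ p ∈ rl, out.getD p.1.toNat '?' = p.2.getD 0 '?' ∧ p.1.toNat < out.length) →
    setAll rl 0 out = out := by
  induction rl with
  | nil => intro out _; rfl
  | cons p r ih =>
      intro out hinv
      obtain ⟨k, opts⟩ := p
      obtain ⟨hv, hk⟩ := hinv (k, opts) (by simp)
      have hset : out.set k.toNat (opts.getD (0 % opts.length) '?') = out := by
        rw [Nat.zero_mod]
        rw [← hv, List.getD_eq_getElem?_getD, List.getElem?_eq_getElem hk]
        simp
      rw [setAll, Nat.zero_div, hset]
      exact ih out (fun q hq => hinv q (by simp [hq]))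

-- skipping the single-option positions and breaking at j = 0 changes nothing:
-- those writes re-write the character the combo already carries
theorem decodeUpd_filter (rl : List (Int × List Char)) :
    ∀ (j : Nat) (out : List Char),
    (rl.map (fun p => p.1)).Nodup →
    (∀ p ∈ rl, out.getD p.1.toNat '?' = p.2.getD 0 '?' ∧ p.1.toNat < out.length ∧
        0 ≤ p.1 ∧ p.2 ≠ []) →
    decodeUpd (rl.filter (fun p => decide (1 < p.2.length))) j out = setAll rl j out := by
  induction rl with
  | nil => intro j out _ _; rfl
  | cons p r ih =>
      intro j out hnd hinv
      obtain ⟨k, opts⟩ := p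
      obtain ⟨hv, hk, hk0, hne⟩ := hinv (k, opts) (by simp)
      by_cases hj : j = 0
      · subst hj
        rw [decodeUpd_zero]
        exact (setAll_zero _ out (fun q hq => ⟨(hinv q hq).1, (hinv q hq).2.1⟩)).symm
      · have hopts : 0 < opts.length := List.length_pos_iff.mpr hne
        by_cases hb : 1 < opts.length
        · rw [List.filter_cons_of_pos (by simpa using hb)]
          rw [decodeUpd, if_neg hj, setAll]
          apply ih
          · exact (List.nodup_cons.mp hnd).2
          · intro q hq
            obtain ⟨qv, qk, qk0, qne⟩ := hinv q (by simp [hq])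
            refine ⟨?_, by simpa using qk, qk0, qne⟩
            have hq1 : q.1 ∈ r.map (fun p => p.1) :=
              List.mem_map_of_mem (f := fun p : Int × List Char => p.1) hq
            have hne' : q.1 ≠ k := by
              intro he
              exact (List.nodup_cons.mp hnd).1 (he ▸ hq1)
            have hne2 : k.toNat ≠ q.1.toNat := by
              have h0 := (hinv q (by simp [hq])).2.2.1
              omega
            rw [List.getD_eq_getElem?_getD, List.getElem?_set_ne hne2]
            rw [← List.getD_eq_getElem?_getD]
            exact qv
        · have h1 : opts.length = 1 := by omega
          rw [List.filter_cons_of_neg (by simpa using hb)]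
          rw [setAll, h1, Nat.div_one, Nat.mod_one]
          have hset : out.set k.toNat (opts.getD 0 '?') = out := by
            rw [← hv, List.getD_eq_getElem?_getD, List.getElem?_eq_getElem hk]
            simp
          rw [hset]
          apply ih
          · exact (List.nodup_cons.mp hnd).2
          · exact fun q hq => hinv q (by simp [hq])

-- B's indexed loop IS stopFold over the decoded strings of range' i n
theorem goB_eq (cap : Int) (active : List (Int × List Char)) (base : List Char) (total : Nat) :
    ∀ (n i : Nat) (s : PySem.Set String), total = i + n →
    goB cap active base total i s
      = (stopFold cap ((List.range' i n).map (fun k => String.ofList (decodeUpd active k base)))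
          (s, false)).1 := by
  intro n
  induction n with
  | zero =>
      intro i s h
      rw [goB]
      simp [h, stopFold]
  | succ n ih =>
      intro i s h
      rw [goB]
      have hi : i < total := by omega
      rw [dif_pos hi, List.range'_succ, List.map_cons]
      simp only [stopFold, Bool.false_eq_true, if_false]
      set s' := PySem.Set.add s (String.ofList (decodeUpd active i base)) with hs'
      by_cases hc : cap ≤ (s'.length : Int)
      · rw [if_pos hc]
        rw [stopFold_done _ _ _ (by simp [hc])]
      · rw [if_neg hc]
        have := ih (i + 1) s' (by omega)
        simpa [hc] using this

theorem foldl_mul_len (cs : List (List Char)) :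
    cs.foldl (fun t c => t * c.length) 1 = prodLen cs := by
  simp [prodLen, List.prod_eq_foldl, List.foldl_map]

-- ===== VERDICT (by name: the statement is the Claim_ definition above) =====
theorem generate_leet_variants_spec : Claim_equal_generate_leet_variants := by
  intro word cap _
  unfold Spec_generate_leet_variants generate_leet_variants generate_leet_variants_alt
  by_cases hw : word.toList.isEmpty
  · simp [hw]
  · simp only [hw, Bool.false_eq_true, if_false]
    set cs := leetChoices word.toList with hcs
    set base := cs.map (fun opts => opts.getD 0 '?') with hbase
    set active := ((PySem.List.enumerate cs).filter (fun p => decide (1 < p.2.length))).reverse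
      with hactive
    rw [prodLoop_eq, foldl_mul_len,
        goB_eq cap active base (prodLen cs) (prodLen cs) 0 PySem.Set.empty (by omega)]
    congr 1
    congr 1
    rw [← List.range_eq_range']
    rw [← map_decodeF_range cs, List.map_map]
    apply List.map_congr_left
    intro k hk
    have hkl : k < prodLen cs := List.mem_range.mp hk
    have hne : ∀ opts ∈ cs, opts ≠ [] := by
      intro o ho h0
      have : prodLen cs = 0 := by
        unfold prodLen
        exact List.prod_eq_zero (by simpa [h0] using List.mem_map_of_mem (f := List.length) ho)
      omega
    have hact : active = ((PySem.List.enumerate cs).reverse).filter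
        (fun p => decide (1 < p.2.length)) := by
      rw [hactive, List.filter_reverse]
    have hupd : decodeUpd active k base = decodeF cs k := by
      rw [hact, decodeUpd_filter _ k base]
      · have h0 : PySem.List.enumerate cs = PySem.List.enumerate cs ((0 : Nat) : Int) := by
          norm_num
        rw [h0, setAll_enum_rev cs 0 k base (by simp [hbase])]
        simp [hbase]
      · rw [List.map_reverse, List.nodup_reverse,
            show (fun p : Int × List Char => p.1) = Prod.fst from rfl,
            PySem.List.map_fst_enumerate]
        exact PySem.List.nodup_pyRange_one _ _
      · intro p hp
        rw [List.mem_reverse] at hp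
        rw [PySem.List.mem_enumerate_iff] at hp
        obtain ⟨k', hk', hpe⟩ := hp
        subst hpe
        have hb : base.getD k' '?' = cs[k'].getD 0 '?' := by
          rw [hbase, List.getD_eq_getElem?_getD, List.getElem?_map,
              List.getElem?_eq_getElem hk']
          rfl
        refine ⟨by simpa using hb, by simp [hbase]; omega, by omega, hne _ (List.getElem_mem hk')⟩
    rw [hupd]
    rfl
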